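-- pv_equiv track=rewrite | github.com/beetrootfarmer/TIL | Algorithm/Algorithm_매일알고/2447 별찍기/sol.py | print_stars
-- ===== SOURCE A (Python) =====
-- def print_stars(n):
--     if n == 1:
--         return ['*']
--     Stars = print_stars(n//3)
--     S = []
--
--     for star in Stars:
--         S.append(star*3)
--     for star in Stars:
--         S.append(star+' '*(n//3)+star)
--     for star in Stars:
--         S.append(star*3)
--     return S
-- ===== SOURCE B (Python) =====
-- def print_stars(n):
--     # Iterative digit-driven construction: each row i is rebuilt from the
--     # base-3 digits of i, with the gap widths taken from the chain n, n//3, ...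
--     ms = []
--     m = n
--     while m > 1:
--         ms.append(m)
--         m //= 3
--     rows = []
--     for i in range(3 ** len(ms)):
--         s = '*'
--         x = i
--         for g in reversed(ms):
--             if x % 3 == 1:
--                 s = s + ' ' * (g // 3) + s
--             else:
--                 s = s + s + s
--             x //= 3
--         rows.append(s)
--     return rows
-- ===== Notes on version B (the rewrite author's own statement) =====
-- stated objective: alternative
-- what changed: Replaced the recursive grid expansion by an iterative per-row construction: B computes the chain n, n//3, ..., then builds each row independently from the base-3 digits of its index, using the chain values as gap widths.
import Mathlib
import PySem

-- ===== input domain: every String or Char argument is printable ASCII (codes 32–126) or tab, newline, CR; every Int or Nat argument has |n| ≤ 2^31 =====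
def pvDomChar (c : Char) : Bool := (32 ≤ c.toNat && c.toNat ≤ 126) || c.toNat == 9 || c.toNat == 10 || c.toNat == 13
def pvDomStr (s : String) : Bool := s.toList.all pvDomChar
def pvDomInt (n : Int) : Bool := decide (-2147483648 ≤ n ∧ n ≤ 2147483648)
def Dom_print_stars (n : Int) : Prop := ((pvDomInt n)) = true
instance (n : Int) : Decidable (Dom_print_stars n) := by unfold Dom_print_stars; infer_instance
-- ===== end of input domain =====

-- B replaces A's recursive grid expansion by an iterative per-row construction from
-- the base-3 digits of the row index (objective: alternative, same asymptotic cost).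

-- ===== PORT A =====
-- Python string ops, exact over List Char (never through Lean's opaque String ops)
def pyStrCat (a b : String) : String := String.ofList (a.toList ++ b.toList)   -- Python s + t
def pyStrMul (s : String) (k : Int) : String := String.ofList (PySem.List.pyRepeat s.toList k)  -- Python s * k
def pySpaces (k : Int) : String := String.ofList (PySem.List.pyRepeat [' '] k)  -- Python ' ' * k

-- fuel-guarded transliteration of A's recursion; the fuel only makes the definition
-- total (on every input in Dom on which the Python recursion terminates at all,
-- the recursion depth is at most 20 < 64, proved from Dom in the lemmas below)
def printStarsFuel : Nat → Int → List String
  | 0, _ => []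
  | fuel+1, n =>
    if n = 1 then ["*"]
    else
      let Stars := printStarsFuel fuel (PySem.Int.floordiv n 3)
      let S1 := Stars.foldl (fun S star => S ++ [pyStrMul star 3]) ([] : List String)
      let S2 := Stars.foldl (fun S star =>
        S ++ [pyStrCat (pyStrCat star (pySpaces (PySem.Int.floordiv n 3))) star]) S1
      Stars.foldl (fun S star => S ++ [pyStrMul star 3]) S2

def print_stars (n : Int) : List String := printStarsFuel 64 n

-- ===== PORT B =====
-- the while loop 'while m > 1: ms.append(m); m //= 3'
def msChain (m : Int) : List Int :=
  if _h : 1 < m then m :: msChain (PySem.Int.floordiv m 3) else []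
termination_by m.toNat
decreasing_by
  rw [PySem.Int.floordiv_eq_ediv_of_pos (by norm_num)]
  omega

-- one iteration of Source B's inner 'for g in reversed(ms)' loop, state (s, x)
def buildRowStep (acc : String × Int) (g : Int) : String × Int :=
  (if PySem.Int.mod acc.2 3 = 1
     then pyStrCat (pyStrCat acc.1 (pySpaces (PySem.Int.floordiv g 3))) acc.1
     else pyStrCat (pyStrCat acc.1 acc.1) acc.1,
   PySem.Int.floordiv acc.2 3)

def print_stars_alt (n : Int) : List String :=
  let ms := msChain n
  (PySem.List.pyRange 0 ((3:Int) ^ ms.length) 1).foldl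
    (fun rows i => rows ++ [(ms.reverse.foldl buildRowStep ("*", i)).1]) []

-- ===== PRECONDITION & SPEC =====
-- Pre_ excludes exactly the inputs on which the Python A never returns (the recursion
-- n → n//3 never reaches 1, so it raises RecursionError): A terminates iff n ≥ 1 and
-- the leading base-3 digit of n is 1, i.e. 3^k ≤ n < 2·3^k for some k.
def Pre_print_stars (n : Int) : Prop := ∃ k : Nat, (3:Int)^k ≤ n ∧ n < 2 * 3^k

-- fast Boolean test for Pre_ (leading base-3 digit is 1), used only for decidability;
-- fuel-based structural recursion so that the kernel can evaluate it
def preDigitFuel : Nat → Nat → Bool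
  | 0, _ => false
  | f+1, m => if m < 3 then m == 1 else preDigitFuel f (m / 3)

def preDigit (m : Nat) : Bool := preDigitFuel m m

lemma preDigitFuel_iff : ∀ (f m : Nat), m ≤ f → 1 ≤ m →
    (preDigitFuel f m = true ↔ ∃ k, 3^k ≤ m ∧ m < 2 * 3^k) := by
  intro f
  induction f with
  | zero => intro m h1 h2; omega
  | succ f ih =>
    intro m hmf hm
    rw [preDigitFuel]
    by_cases h : m < 3
    · rw [if_pos h]
      constructor
      · intro he
        have : m = 1 := by simpa using he
        exact ⟨0, by omega⟩
      · rintro ⟨k, h1, h2⟩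
        match k with
        | 0 => simp; omega
        | k+1 =>
          have : 3^1 ≤ 3^(k+1) := Nat.pow_le_pow_right (by norm_num) (by omega)
          simp at this h1 h2 ⊢
          omega
    · rw [if_neg h]
      have hlt : m / 3 < m := Nat.div_lt_self (by omega) (by norm_num)
      rw [ih (m / 3) (by omega) (by omega)]
      constructor
      · rintro ⟨k, h1, h2⟩
        refine ⟨k + 1, ?_, ?_⟩
        · rw [pow_succ]
          exact (Nat.le_div_iff_mul_le (by norm_num)).mp h1
        · have h2' := (Nat.div_lt_iff_lt_mul (show 0 < 3 by norm_num)).mp h2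
          calc m < 2 * 3^k * 3 := h2'
          _ = 2 * 3^(k+1) := by ring
      · rintro ⟨k, h1, h2⟩
        match k with
        | 0 => omega
        | k+1 =>
          refine ⟨k, ?_, ?_⟩
          · rw [pow_succ] at h1
            exact (Nat.le_div_iff_mul_le (by norm_num)).mpr h1
          · apply (Nat.div_lt_iff_lt_mul (show 0 < 3 by norm_num)).mpr
            calc m < 2 * 3^(k+1) := h2
            _ = 2 * 3^k * 3 := by ring

lemma preDigit_iff (m : Nat) (hm : 1 ≤ m) :
    (preDigit m = true ↔ ∃ k, 3^k ≤ m ∧ m < 2 * 3^k) :=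
  preDigitFuel_iff m m (le_refl m) hm

lemma pre_iff_bool (n : Int) : Pre_print_stars n ↔ (0 < n ∧ preDigit n.toNat = true) := by
  unfold Pre_print_stars
  constructor
  · rintro ⟨k, h1, h2⟩
    have hp : (0:Int) < 3^k := by positivity
    have hn : 0 < n := lt_of_lt_of_le hp h1
    refine ⟨hn, (preDigit_iff n.toNat (by omega)).mpr ⟨k, ?_, ?_⟩⟩
    · have h1' : ((3^k : Nat) : Int) ≤ n := by push_cast; exact h1
      omega
    · have h2' : n < ((2 * 3^k : Nat) : Int) := by push_cast; exact h2
      omega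
  · rintro ⟨hn, hd⟩
    obtain ⟨k, h1, h2⟩ := (preDigit_iff n.toNat (by omega)).mp hd
    refine ⟨k, ?_, ?_⟩
    · have h1' : ((3^k : Nat) : Int) ≤ (n.toNat : Int) := by exact_mod_cast h1
      push_cast at h1'
      omega
    · have h2' : (n.toNat : Int) < ((2 * 3^k : Nat) : Int) := by exact_mod_cast h2
      push_cast at h2'
      omega

instance (n : Int) : Decidable (Pre_print_stars n) :=
  decidable_of_iff _ (pre_iff_bool n).symm
def pvWitness_print_stars : Int := (9)

def Spec_print_stars (n : Int) (out : List String) : Prop := out = print_stars_alt n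
instance (n : Int) (out : List String) : Decidable (Spec_print_stars n out) := by unfold Spec_print_stars; infer_instance

-- ===== CLAIM (what is proved, stated in full; the proofs are below) =====
def Claim_equal_print_stars : Prop := ∀ (n : Int), Dom_print_stars n → Pre_print_stars n → Spec_print_stars n (print_stars n)

-- ===== LEMMAS AND PROOFS =====

lemma msChain_one : msChain 1 = [] := by rw [msChain]; simp

lemma msChain_step (n : Int) (h : 1 < n) :
    msChain n = n :: msChain (PySem.Int.floordiv n 3) := by
  rw [msChain]; simp [h]

lemma bounds_div (k : Nat) (n : Int) (h1 : (3:Int)^(k+1) ≤ n) (h2 : n < 2 * 3^(k+1)) :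
    (3:Int)^k ≤ PySem.Int.floordiv n 3 ∧ PySem.Int.floordiv n 3 < 2 * 3^k := by
  rw [PySem.Int.floordiv_eq_ediv_of_pos (by norm_num)]
  rw [pow_succ] at h1 h2
  have hm : (0:Int) < 3^k := by positivity
  constructor <;> omega

lemma msChain_len : ∀ (k : Nat) (n : Int), (3:Int)^k ≤ n → n < 2 * 3^k →
    (msChain n).length = k := by
  intro k
  induction k with
  | zero =>
    intro n h1 h2
    have : n = 1 := by simp at h1 h2; omega
    simp [this, msChain_one]
  | succ k ih =>
    intro n h1 h2
    have hn : 1 < n := by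
      have : (3:Int) ≤ 3^(k+1) := by
        calc (3:Int) = 3^1 := by norm_num
        _ ≤ 3^(k+1) := by
          apply pow_le_pow_right₀ <;> omega
      omega
    obtain ⟨hb1, hb2⟩ := bounds_div k n h1 h2
    rw [msChain_step n hn]
    simp only [List.length_cons, ih _ hb1 hb2]

-- row builder of B, as a function of the reversed chain and the row index
def rowB (gs : List Int) (i : Int) : String := (gs.foldl buildRowStep ("*", i)).1

lemma toNat_pow3 (d : Nat) : ((3:Int)^d).toNat = 3^d := by
  have : ((3:Int)^d) = ((3^d : Nat) : Int) := by push_cast; ring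
  rw [this, Int.toNat_natCast]

lemma alt_eq_map (n : Int) :
    print_stars_alt n =
      (List.range (3 ^ (msChain n).length)).map
        (fun (j : Nat) => rowB (msChain n).reverse (j : Int)) := by
  unfold print_stars_alt rowB
  rw [PySem.List.foldl_append_singleton_eq_map, PySem.List.pyRange_one]
  simp only [List.nil_append, Int.sub_zero, toNat_pow3, List.map_map]
  apply List.map_congr_left
  intro j hj
  simp

-- the inner loop's state: the s-component is driven by the base-3 digits of j,
-- the x-component is j shifted down by the number of digits consumed
lemma foldl_buildRowStep : ∀ (gs : List Int) (s : String) (j : Nat),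
    gs.foldl buildRowStep (s, (j : Int)) =
      ((gs.foldl buildRowStep (s, ((j % 3^gs.length : Nat) : Int))).1,
       ((j / 3^gs.length : Nat) : Int)) := by
  intro gs
  induction gs with
  | nil => simp
  | cons g gs ih =>
    intro s j
    have hmod : ∀ m : Nat, PySem.Int.mod ((m:Nat):Int) 3 = ((m % 3 : Nat) : Int) := by
      intro m; exact_mod_cast PySem.Int.mod_natCast m 3
    have hdiv : ∀ m : Nat, PySem.Int.floordiv ((m:Nat):Int) 3 = ((m / 3 : Nat) : Int) := by
      intro m; exact_mod_cast PySem.Int.floordiv_natCast m 3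
    have hmm : j % 3^(gs.length+1) % 3 = j % 3 :=
      Nat.mod_mod_of_dvd j (dvd_pow_self 3 (Nat.succ_ne_zero gs.length))
    have hmd : j % 3^(gs.length+1) / 3 = j / 3 % 3^gs.length := by
      rw [pow_succ, mul_comm]
      exact Nat.mod_mul_right_div_self j 3 (3^gs.length)
    have hdd : j / 3 / 3^gs.length = j / 3^(gs.length+1) := by
      rw [Nat.div_div_eq_div_mul, pow_succ, mul_comm]
    simp only [List.foldl_cons, List.length_cons, buildRowStep, hmod, hdiv, hmm, hmd]
    rw [ih, ih]
    simp [hdd, Nat.mod_mod_of_dvd]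

lemma strmul3 (s : String) : pyStrMul s 3 = pyStrCat (pyStrCat s s) s := by
  apply String.toList_inj.mp
  simp [pyStrMul, pyStrCat, PySem.List.pyRepeat]

lemma rowB_append (gs : List Int) (n : Int) (t j : Nat) (hj : j < 3^gs.length) :
    rowB (gs ++ [n]) (((t * 3^gs.length + j : Nat) : Nat) : Int) =
      (if ((t % 3 : Nat) : Int) = 1
        then pyStrCat (pyStrCat (rowB gs (j : Int)) (pySpaces (PySem.Int.floordiv n 3))) (rowB gs (j : Int))
        else pyStrCat (pyStrCat (rowB gs (j : Int)) (rowB gs (j : Int))) (rowB gs (j : Int))) := by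
  unfold rowB
  rw [List.foldl_append]
  rw [foldl_buildRowStep gs "*" (t * 3^gs.length + j)]
  have h1 : (t * 3^gs.length + j) % 3^gs.length = j := by
    rw [Nat.add_comm, Nat.add_mul_mod_self_right]
    exact Nat.mod_eq_of_lt hj
  have h2 : (t * 3^gs.length + j) / 3^gs.length = t := by
    have hp : 0 < 3^gs.length := by positivity
    rw [Nat.add_comm, Nat.add_mul_div_right _ _ hp, Nat.div_eq_of_lt hj]
    omega
  rw [h1, h2]
  have hmod : PySem.Int.mod ((t:Nat):Int) 3 = ((t % 3 : Nat) : Int) := by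
    exact_mod_cast PySem.Int.mod_natCast t 3
  rw [foldl_buildRowStep gs "*" j, Nat.mod_eq_of_lt hj]
  simp [buildRowStep]

lemma range_pow_succ (k : Nat) :
    List.range (3^(k+1)) = List.range (3^k) ++
      ((List.range (3^k)).map (3^k + ·) ++ (List.range (3^k)).map (fun j => 3^k + (3^k + j))) := by
  have h : 3^(k+1) = 3^k + (3^k + 3^k) := by ring
  rw [h, List.range_add, List.range_add]
  simp [List.map_map, Function.comp_def]

set_option maxHeartbeats 1000000 in
lemma main_equiv : ∀ (k : Nat) (f : Nat) (n : Int), k < f →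
    (3:Int)^k ≤ n → n < 2 * 3^k → printStarsFuel f n = print_stars_alt n := by
  intro k
  induction k with
  | zero =>
    intro f n hf h1 h2
    have hn : n = 1 := by simp at h1 h2; omega
    obtain ⟨f', rfl⟩ : ∃ f', f = f' + 1 := ⟨f - 1, by omega⟩
    subst hn
    rw [alt_eq_map, msChain_one]
    simp [printStarsFuel]
    decide
  | succ k ih =>
    intro f n hf h1 h2
    have hn : 1 < n := by
      have : (3:Int) ≤ 3^(k+1) := by
        calc (3:Int) = 3^1 := by norm_num
        _ ≤ 3^(k+1) := by apply pow_le_pow_right₀ <;> omega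
      omega
    obtain ⟨f', rfl⟩ : ∃ f', f = f' + 1 := ⟨f - 1, by omega⟩
    obtain ⟨hb1, hb2⟩ := bounds_div k n h1 h2
    -- A side: unfold one recursion level, loops become maps
    have hne : ¬ (n = 1) := by omega
    rw [printStarsFuel]
    simp only [if_neg hne]
    rw [PySem.List.foldl_append_singleton_eq_map, PySem.List.foldl_append_singleton_eq_map,
        PySem.List.foldl_append_singleton_eq_map]
    rw [ih f' (PySem.Int.floordiv n 3) (by omega) hb1 hb2]
    -- B side: peel the chain and split the index range into the three digit blocks
    have hlenm : (msChain (PySem.Int.floordiv n 3)).length = k := msChain_len k _ hb1 hb2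
    have hchain : msChain n = n :: msChain (PySem.Int.floordiv n 3) := msChain_step n hn
    rw [alt_eq_map n, alt_eq_map (PySem.Int.floordiv n 3), hchain]
    simp only [List.reverse_cons, List.length_cons, hlenm]
    rw [range_pow_succ k]
    set gs := (msChain (PySem.Int.floordiv n 3)).reverse with hgs
    have hlengs : gs.length = k := by rw [hgs, List.length_reverse, hlenm]
    simp only [List.map_append, List.map_map, List.nil_append]
    rw [List.append_assoc]
    refine congrArg₂ (· ++ ·) ?_ (congrArg₂ (· ++ ·) ?_ ?_)
    · -- block t = 0
      apply List.map_congr_left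
      intro j hj
      have hjlt : j < 3^gs.length := by rw [hlengs]; exact List.mem_range.mp hj
      have h0 : (j : Int) = (((0 * 3^gs.length + j : Nat) : Nat) : Int) := by simp
      simp only [Function.comp_apply]
      rw [strmul3, h0, rowB_append gs n 0 j hjlt]
      simp
    · -- block t = 1
      apply List.map_congr_left
      intro j hj
      have hjlt : j < 3^gs.length := by rw [hlengs]; exact List.mem_range.mp hj
      have h0 : ((3^k + j : Nat) : Int) = (((1 * 3^gs.length + j : Nat) : Nat) : Int) := by
        simp [hlengs]
      simp only [Function.comp_apply, h0]
      rw [rowB_append gs n 1 j hjlt]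
      simp
    · -- block t = 2
      apply List.map_congr_left
      intro j hj
      have hjlt : j < 3^gs.length := by rw [hlengs]; exact List.mem_range.mp hj
      have h0 : ((3^k + (3^k + j) : Nat) : Int) = (((2 * 3^gs.length + j : Nat) : Nat) : Int) := by
        simp [hlengs]; ring
      simp only [Function.comp_apply, h0]
      rw [strmul3, rowB_append gs n 2 j hjlt]
      simp

-- within Dom (|n| ≤ 2^31 < 3^20) the exponent of the leading-digit bound is < 64
lemma pre_exponent_small (n : Int) (hd : Dom_print_stars n) (k : Nat)
    (h1 : (3:Int)^k ≤ n) : k < 64 := by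
  by_contra hk
  have h3 : (3:Int)^64 ≤ 3^k := by apply pow_le_pow_right₀ <;> omega
  have hn : n ≤ 2147483648 := by
    unfold Dom_print_stars pvDomInt at hd
    simpa using (of_decide_eq_true hd).2
  have : (3:Int)^64 ≤ 2147483648 := le_trans (le_trans h3 h1) hn
  norm_num at this

-- ===== VERDICT (by name: the statement is the Claim_ definition above) =====
theorem print_stars_spec : Claim_equal_print_stars := by
  intro n hd hpre
  obtain ⟨k, h1, h2⟩ := hpre
  unfold Spec_print_stars print_stars
  exact main_equiv k 64 n (pre_exponent_small n hd k h1) h1 h2
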